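-- pv_equiv track=rewrite | github.com/Kulwantolkha/leetcode-solutions | 2032-two-out-of-three/2032-two-out-of-three.py | twoOutOfThree
-- ===== SOURCE A (Python) =====
-- def twoOutOfThree(nums1, nums2, nums3):
--     """
--     :type nums1: List[int]
--     :type nums2: List[int]
--     :type nums3: List[int]
--     :rtype: List[int]
--     """
--     count = {}
--     set1 = set(nums1)
--     set2 = set(nums2)
--     set3 = set(nums3)
--     for i in set1,set2,set3:
--         for j in i:
--             if j in count:
--                 count[j]+=1
--             else:
--                 count[j] = 1
--     lst=[]
--     for keys,values in count.items():
--         if values>1: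
--             lst.append(keys)
--     return lst
-- ===== SOURCE B (Python) =====
-- def twoOutOfThree(nums1, nums2, nums3):
--     s1, s2, s3 = set(nums1), set(nums2), set(nums3)
--     res = []
--     seen = set()
--     for s in (s1, s2, s3):
--         for x in s:
--             if x not in seen:
--                 seen.add(x)
--                 if (x in s1) + (x in s2) + (x in s3) >= 2:
--                     res.append(x)
--     return res
-- ===== Notes on version B (the rewrite author's own statement) =====
-- stated objective: simpler
-- what changed: A builds a count dict over all three sets and then a second pass over dict items filters counts > 1; B makes a single pass over the three sets with a seen-set, deciding each fresh element immediately by direct membership tests (x in s1)+(x in s2)+(x in s3) >= 2, with no count dict and no second phase.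
import Mathlib
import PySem

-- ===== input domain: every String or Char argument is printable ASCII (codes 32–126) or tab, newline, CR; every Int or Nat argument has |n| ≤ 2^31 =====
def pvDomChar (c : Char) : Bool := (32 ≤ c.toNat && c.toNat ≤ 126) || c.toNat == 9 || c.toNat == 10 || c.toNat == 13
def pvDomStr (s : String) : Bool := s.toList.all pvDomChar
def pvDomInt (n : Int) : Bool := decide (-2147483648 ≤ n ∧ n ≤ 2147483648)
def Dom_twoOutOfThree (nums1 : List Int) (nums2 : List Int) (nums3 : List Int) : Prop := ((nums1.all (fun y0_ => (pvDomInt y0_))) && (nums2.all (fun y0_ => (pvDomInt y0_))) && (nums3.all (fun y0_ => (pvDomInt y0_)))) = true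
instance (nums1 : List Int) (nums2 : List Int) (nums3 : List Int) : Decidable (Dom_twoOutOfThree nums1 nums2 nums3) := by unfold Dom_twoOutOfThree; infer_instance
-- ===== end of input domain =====

-- B replaces A's two-phase count-dict-then-filter with one pass over the three sets using a
-- seen-set and direct membership tests; equality of the RETURN value is proved (no mutation).

-- ===== PORT A =====
def twoOutOfThree (nums1 : List Int) (nums2 : List Int) (nums3 : List Int) : List Int :=
  let count : PySem.Dict Int Int := PySem.Dict.empty
  let set1 : PySem.Set Int := PySem.Set.ofList nums1
  let set2 : PySem.Set Int := PySem.Set.ofList nums2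
  let set3 : PySem.Set Int := PySem.Set.ofList nums3
  let count := [set1, set2, set3].foldl (fun count i =>
    i.foldl (fun count j =>
      if count.contains j then count.insert j (count.getD j 0 + 1)
      else count.insert j 1) count) count
  let lst : List Int := []
  let lst := count.items.foldl (fun lst kv => if kv.2 > 1 then lst ++ [kv.1] else lst) lst
  lst

-- ===== PORT B =====
def twoOutOfThree_alt (nums1 : List Int) (nums2 : List Int) (nums3 : List Int) : List Int :=
  let s1 : PySem.Set Int := PySem.Set.ofList nums1
  let s2 : PySem.Set Int := PySem.Set.ofList nums2
  let s3 : PySem.Set Int := PySem.Set.ofList nums3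
  let st := [s1, s2, s3].foldl (fun st s =>
    s.foldl (fun (st : List Int × PySem.Set Int) x =>
      if st.2.contains x then st
      else if (if s1.contains x then (1 : Int) else 0) + (if s2.contains x then 1 else 0)
             + (if s3.contains x then 1 else 0) ≥ 2
      then (st.1 ++ [x], st.2.add x) else (st.1, st.2.add x)) st)
    (([] : List Int), PySem.Set.empty)
  st.1

-- ===== PRECONDITION & SPEC =====
def Spec_twoOutOfThree (nums1 : List Int) (nums2 : List Int) (nums3 : List Int) (out : List Int) : Prop := out = twoOutOfThree_alt nums1 nums2 nums3
instance (nums1 : List Int) (nums2 : List Int) (nums3 : List Int) (out : List Int) : Decidable (Spec_twoOutOfThree nums1 nums2 nums3 out) := by unfold Spec_twoOutOfThree; infer_instance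

-- ===== CLAIM (what is proved, stated in full; the proofs are below) =====
def Claim_equal_twoOutOfThree : Prop := ∀ (nums1 : List Int) (nums2 : List Int) (nums3 : List Int), Dom_twoOutOfThree nums1 nums2 nums3 → Spec_twoOutOfThree nums1 nums2 nums3 (twoOutOfThree nums1 nums2 nums3)

-- ===== LEMMAS AND PROOFS =====

-- A's counting fold is Counter(L): the guarded branch equals insert x (getD x 0 + 1) pointwise.
lemma foldA_eq_counter (L : List Int) :
    L.foldl (fun count j =>
      if count.contains j then count.insert j (count.getD j 0 + 1)
      else count.insert j 1) PySem.Dict.empty = PySem.Dict.counter L := by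
  rw [← PySem.Dict.foldl_insert_getD_add_one_eq_counter]
  apply List.foldl_ext
  intro d x _
  by_cases h : d.contains x
  · simp [h]
  · simp [h, PySem.Dict.getD_of_not_contains d 0 (by simpa using h)]

-- the elements of L not yet in `seen`, in first-occurrence order (B's fresh appends)
def fresh (seen : PySem.Set Int) : List Int → List Int
  | [] => []
  | x :: L => if seen.contains x then fresh seen L else x :: fresh (seen.add x) L

lemma append_fresh_eq_foldl_add (L : List Int) :
    ∀ seen : PySem.Set Int, seen ++ fresh seen L = L.foldl PySem.Set.add seen := by
  induction L with
  | nil => intro seen; simp [fresh]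
  | cons x L ih =>
    intro seen
    by_cases h : x ∈ seen
    · have hadd : PySem.Set.add seen x = seen := by simp [PySem.Set.add, h]
      simp only [List.foldl_cons, hadd, ← ih seen, fresh]
      simp [h]
    · have hadd : PySem.Set.add seen x = seen ++ [x] := by simp [PySem.Set.add, h]
      simp only [List.foldl_cons, ← ih (seen.add x), fresh]
      simp [h]

lemma fresh_empty_eq_ofList (L : List Int) : fresh PySem.Set.empty L = PySem.Set.ofList L := by
  simpa [PySem.Set.empty] using append_fresh_eq_foldl_add L PySem.Set.empty

-- B's one-pass loop appends exactly the fresh elements that pass the membership test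
lemma foldB_fst (p : Int → Prop) [DecidablePred p] (L : List Int) :
    ∀ (acc : List Int) (seen : PySem.Set Int),
    (L.foldl (fun (st : List Int × PySem.Set Int) x =>
      if st.2.contains x then st
      else if p x then (st.1 ++ [x], st.2.add x) else (st.1, st.2.add x)) (acc, seen)).1
    = acc ++ (fresh seen L).filter (fun x => decide (p x)) := by
  induction L with
  | nil => intro acc seen; simp [fresh]
  | cons x L ih =>
    intro acc seen
    simp only [List.foldl_cons, fresh]
    by_cases h : seen.contains x = true
    · rw [if_pos h, if_pos h, ih]
    · rw [if_neg h, if_neg h]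
      by_cases hp : p x
      · rw [if_pos hp, ih]
        simp [hp]
      · rw [if_neg hp, ih]
        simp [hp]

-- A's output loop over dict items is a filter
lemma foldl_append_if_filter (p : Int → Prop) [DecidablePred p] (l : List Int) :
    ∀ acc : List Int,
    l.foldl (fun lst k => if p k then lst ++ [k] else lst) acc
      = acc ++ l.filter (fun k => decide (p k)) := by
  induction l with
  | nil => intro acc; simp
  | cons y ys ih =>
    intro acc
    by_cases h : p y
    · simp [h, ih]
    · simp [h, ih]

-- count in a Nodup list is the 0/1 membership indicator
lemma count_nodup_indicator (s : List Int) (h : s.Nodup) (x : Int) :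
    s.count x = if x ∈ s then 1 else 0 := by
  by_cases hm : x ∈ s
  · simp [hm, List.count_eq_one_of_mem h hm]
  · simp [hm, List.count_eq_zero_of_not_mem hm]

-- ===== VERDICT (by name: the statement is the Claim_ definition above) =====
theorem twoOutOfThree_spec : Claim_equal_twoOutOfThree := by
  intro nums1 nums2 nums3 _
  unfold Spec_twoOutOfThree twoOutOfThree twoOutOfThree_alt
  set s1 : PySem.Set Int := PySem.Set.ofList nums1 with hs1
  set s2 : PySem.Set Int := PySem.Set.ofList nums2 with hs2
  set s3 : PySem.Set Int := PySem.Set.ofList nums3 with hs3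
  simp only [List.foldl_cons, List.foldl_nil]
  rw [show ∀ (d : PySem.Dict Int Int),
        s3.foldl _ (s2.foldl _ (s1.foldl (fun count j =>
          if count.contains j then count.insert j (count.getD j 0 + 1)
          else count.insert j 1) d)) = (s1 ++ s2 ++ s3).foldl (fun count j =>
          if count.contains j then count.insert j (count.getD j 0 + 1)
          else count.insert j 1) d from fun d => by simp [List.foldl_append]]
  rw [show ∀ (st : List Int × PySem.Set Int),
        s3.foldl _ (s2.foldl _ (s1.foldl (fun (st : List Int × PySem.Set Int) x =>
          if st.2.contains x then st
          else if (if s1.contains x then (1 : Int) else 0) + (if s2.contains x then 1 else 0)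
                 + (if s3.contains x then 1 else 0) ≥ 2
          then (st.1 ++ [x], st.2.add x) else (st.1, st.2.add x)) st))
        = (s1 ++ s2 ++ s3).foldl (fun (st : List Int × PySem.Set Int) x =>
          if st.2.contains x then st
          else if (if s1.contains x then (1 : Int) else 0) + (if s2.contains x then 1 else 0)
                 + (if s3.contains x then 1 else 0) ≥ 2
          then (st.1 ++ [x], st.2.add x) else (st.1, st.2.add x)) st from fun st => by
      simp [List.foldl_append]]
  rw [foldA_eq_counter, foldB_fst
      (fun x => (if s1.contains x then (1 : Int) else 0) + (if s2.contains x then 1 else 0)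
                 + (if s3.contains x then 1 else 0) ≥ 2),
    fresh_empty_eq_ofList]
  rw [PySem.Dict.items_counter, List.foldl_map,
    foldl_append_if_filter (fun k => ((s1 ++ s2 ++ s3).count k : Int) > 1)]
  simp only [List.nil_append]
  apply List.filter_congr
  intro k hk
  have h1 : s1.Nodup := PySem.Set.nodup_ofList nums1
  have h2 : s2.Nodup := PySem.Set.nodup_ofList nums2
  have h3 : s3.Nodup := PySem.Set.nodup_ofList nums3
  have e1 := count_nodup_indicator s1 h1 k
  have e2 := count_nodup_indicator s2 h2 k
  have e3 := count_nodup_indicator s3 h3 k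
  by_cases q1 : k ∈ s1 <;> by_cases q2 : k ∈ s2 <;> by_cases q3 : k ∈ s3 <;>
    simp [e1, e2, e3, q1, q2, q3]
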